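-- pv_equiv track=rewrite | github.com/DEVANSHUMARKAM/NLP-SQL | backend.py | find_best_example
-- ===== SOURCE A (Python) =====
-- def find_best_example(user_question, examples):
--     """
--     Finds the best example from a list based on word overlap.
--     A simple but effective keyword matching approach.
--     """
--     best_example = None
--     max_overlap = 0
--     user_words = set(user_question.lower().split())
--
--     for example in examples:
--         example_words = set(example["question"].lower().split())
--         overlap = len(user_words.intersection(example_words))
--
--         if overlap > max_overlap:
--             max_overlap = overlap
--             best_example = example
--
--     # Return a default if no good match is found to prevent errors
--     if best_example is None:
--         return examples[0]
--     return best_example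
-- ===== SOURCE B (Python) =====
-- def find_best_example(user_question, examples):
--     """Rank the examples by word overlap with the query and return the top-ranked one."""
--     user_words = set(user_question.lower().split())
--     ranked = sorted(
--         examples,
--         key=lambda example: len(user_words & set(example["question"].lower().split())),
--         reverse=True,
--     )
--     return ranked[0]
-- ===== Notes on version B (the rewrite author's own statement) =====
-- stated objective: idiomatic
-- what changed: Replaces the manual best/max tracking loop (with its None sentinel and explicit default) by ranking the examples with a stable reverse sort on overlap and returning the top element; stability reproduces A's first-wins tie-breaking and all-zero default.
import Mathlib
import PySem

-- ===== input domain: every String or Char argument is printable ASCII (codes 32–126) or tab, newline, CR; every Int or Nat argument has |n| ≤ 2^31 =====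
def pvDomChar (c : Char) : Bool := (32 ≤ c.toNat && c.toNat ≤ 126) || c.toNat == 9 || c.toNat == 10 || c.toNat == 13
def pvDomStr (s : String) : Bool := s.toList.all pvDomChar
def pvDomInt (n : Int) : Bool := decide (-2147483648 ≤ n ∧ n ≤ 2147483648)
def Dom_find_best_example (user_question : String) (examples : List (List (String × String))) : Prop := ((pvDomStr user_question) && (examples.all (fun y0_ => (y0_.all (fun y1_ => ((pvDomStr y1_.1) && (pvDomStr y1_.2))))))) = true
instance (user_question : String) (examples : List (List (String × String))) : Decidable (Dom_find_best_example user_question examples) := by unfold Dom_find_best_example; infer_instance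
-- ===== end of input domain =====

-- B ranks the examples by word overlap with a stable reverse sort and returns the top one,
-- instead of A's manual best/max tracking loop with a None sentinel and explicit default.


-- ===== PORT A =====
-- the word-overlap score both Pythons compute for one example (len(user_words & set(e["question"].lower().split())))
def pvOverlap (user_words : PySem.Set String) (ex : List (String × String)) : Nat :=
  (PySem.Set.inter user_words
    (PySem.Set.ofList (PySem.Str.split₀ (PySem.Str.lower
      (((PySem.Dict.mk ex).get? "question").getD ""))))).length

def find_best_example (user_question : String) (examples : List (List (String × String))) : List (String × String) :=
  let user_words : PySem.Set String := PySem.Set.ofList (PySem.Str.split₀ (PySem.Str.lower user_question))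
  let r := examples.foldl
    (fun (st : Option (List (String × String)) × Nat) ex =>
      let overlap := pvOverlap user_words ex
      if overlap > st.2 then (some ex, overlap) else st)
    (none, 0)
  match r.1 with
  | none => (PySem.List.pyGet? examples 0).getD []   -- examples[0]; Pre_ excludes examples = [] (IndexError)
  | some best_example => best_example

-- ===== PORT B =====
def find_best_example_alt (user_question : String) (examples : List (List (String × String))) : List (String × String) :=
  let user_words : PySem.Set String := PySem.Set.ofList (PySem.Str.split₀ (PySem.Str.lower user_question))
  let ranked := PySem.List.sorted examples (fun ex => pvOverlap user_words ex) true
  (PySem.List.pyGet? ranked 0).getD []               -- ranked[0]; Pre_ excludes examples = [] (IndexError)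

-- ===== PRECONDITION & SPEC =====
-- A raises IndexError on examples = [] and KeyError when an example lacks the "question" key; Pre_ excludes exactly those.
def Pre_find_best_example (_user_question : String) (examples : List (List (String × String))) : Prop :=
  examples ≠ [] ∧ ∀ ex ∈ examples, ((PySem.Dict.mk ex).get? "question").isSome
instance (user_question : String) (examples : List (List (String × String))) : Decidable (Pre_find_best_example user_question examples) := by unfold Pre_find_best_example; infer_instance
def pvWitness_find_best_example : String × (List (List (String × String))) :=
  ("find all the users", [[("question", "find users"), ("sql", "SELECT * FROM users")], [("question", "count orders"), ("sql", "SELECT COUNT(*) FROM orders")]])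

def Spec_find_best_example (user_question : String) (examples : List (List (String × String))) (out : List (String × String)) : Prop := out = find_best_example_alt user_question examples
instance (user_question : String) (examples : List (List (String × String))) (out : List (String × String)) : Decidable (Spec_find_best_example user_question examples out) := by unfold Spec_find_best_example; infer_instance

-- ===== CLAIM (what is proved, stated in full; the proofs are below) =====
def Claim_equal_find_best_example : Prop := ∀ (user_question : String) (examples : List (List (String × String))), Dom_find_best_example user_question examples → Pre_find_best_example user_question examples → Spec_find_best_example user_question examples (find_best_example user_question examples)

-- ===== LEMMAS AND PROOFS =====

-- "pick": the first element of x :: l attaining the maximal key — the common value of both programs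
def pvPick {α : Type} (k : α → Nat) (x : α) (l : List α) : α :=
  l.foldl (fun b y => if k b < k y then y else b) x

-- A's loop from a committed state (some b, k b) is exactly pvPick
theorem pvFoldA_some {α : Type} (k : α → Nat) (l : List α) (b : α) :
    l.foldl (fun (st : Option α × Nat) y => if k y > st.2 then (some y, k y) else st) (some b, k b)
      = (some (pvPick k b l), k (pvPick k b l)) := by
  induction l generalizing b with
  | nil => rfl
  | cons x l ih =>
    simp only [List.foldl, pvPick]
    by_cases h : k b < k x
    · simp only [gt_iff_lt, h, if_pos] ; simpa [pvPick] using ih x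
    · simp only [gt_iff_lt, h, if_false] ; simpa [pvPick] using ih b

-- A's loop from the initial (none, 0) state, with the examples[0] default, is pvPick from any zero-key start
theorem pvFoldA_none {α : Type} (k : α → Nat) (l : List α) (x : α) (hx : k x = 0) :
    ((l.foldl (fun (st : Option α × Nat) y => if k y > st.2 then (some y, k y) else st) (none, 0)).1).getD x
      = pvPick k x l := by
  induction l generalizing x with
  | nil => simp [pvPick]
  | cons y l ih =>
    simp only [List.foldl, pvPick]
    by_cases h : 0 < k y
    · simp only [gt_iff_lt, h, if_pos]
      rw [pvFoldA_some k l y]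
      simp [pvPick, hx, h]
    · have hy : k y = 0 := by omega
      simp only [gt_iff_lt, h, if_false]
      have := ih x hx
      simp only [pvPick] at this
      rw [this]
      simp [hx, hy]

-- the head of the stable reverse insertion sort, tracked through the fold: it is pvPick of the pending elements
theorem pvSortedHead {α : Type} (k : α → Nat) (l : List α) (h : α) (t : List α)
    (hmax : ∀ y ∈ t, k y ≤ k h) :
    (l.foldl (fun acc x => PySem.List.insertBy (fun a b => decide (k b < k a)) x acc) (h :: t)).head?
      = some (pvPick k h l) := by
  induction l generalizing h t with
  | nil => simp [pvPick]
  | cons x l ih =>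
    simp only [List.foldl, PySem.List.insertBy, pvPick]
    by_cases hc : k h < k x
    · simp only [hc, decide_true, if_pos]
      have : ∀ y ∈ h :: t, k y ≤ k x := by
        intro y hy
        rcases List.mem_cons.1 hy with rfl | hy
        · exact le_of_lt hc
        · exact le_trans (hmax y hy) (le_of_lt hc)
      simpa [pvPick, hc] using ih x (h :: t) this
    · simp only [hc, decide_false, Bool.false_eq_true, if_false]
      have : ∀ y ∈ PySem.List.insertBy (fun a b => decide (k b < k a)) x t, k y ≤ k h := by
        intro y hy
        rcases (PySem.List.mem_insertBy _ _ _ _).1 hy with rfl | hy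
        · omega
        · exact hmax y hy
      simpa [pvPick, hc] using ih h _ this

-- the two programs agree on any nonempty list: both compute pvPick of the key
theorem pvAB {α : Type} (k : α → Nat) (x : α) (l : List α) (d : α) :
    (((x :: l).foldl (fun (st : Option α × Nat) y => if k y > st.2 then (some y, k y) else st) (none, 0)).1).getD
        ((PySem.List.pyGet? (x :: l) 0).getD d)
      = (PySem.List.pyGet? (PySem.List.sorted (x :: l) k true) 0).getD d := by
  have hhead : (PySem.List.sorted (x :: l) k true).head? = some (pvPick k x l) := by
    rw [PySem.List.sorted_rev_eq_foldl_insertBy]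
    simp only [List.foldl, PySem.List.insertBy]
    exact pvSortedHead k l x [] (by simp)
  obtain ⟨t, ht⟩ : ∃ t, PySem.List.sorted (x :: l) k true = pvPick k x l :: t := by
    cases hsrt : PySem.List.sorted (x :: l) k true with
    | nil => rw [hsrt] at hhead; simp at hhead
    | cons a b => rw [hsrt] at hhead; simp at hhead; exact ⟨b, by rw [hhead]⟩
  rw [ht]
  simp only [List.foldl]
  by_cases hx : 0 < k x
  · simp only [gt_iff_lt, hx, if_pos]
    rw [pvFoldA_some k l x]
    simp [PySem.List.pyGet?, PySem.List.pyIdx?]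
  · have h0 : k x = 0 := by omega
    simp only [gt_iff_lt, hx, if_false]
    have hA := pvFoldA_none k l x h0
    simp only [gt_iff_lt] at hA
    cases hres : (l.foldl (fun (st : Option α × Nat) y => if st.2 < k y then (some y, k y) else st) (none, 0)).1 with
    | none =>
      rw [hres] at hA; simp only [Option.getD_none] at hA
      simp [PySem.List.pyGet?, PySem.List.pyIdx?, ← hA]
    | some b =>
      rw [hres] at hA; simp only [Option.getD_some] at hA
      simp [PySem.List.pyGet?, PySem.List.pyIdx?, hA]

-- ===== VERDICT (by name: the statement is the Claim_ definition above) =====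
theorem find_best_example_spec : Claim_equal_find_best_example := by
  intro user_question examples _hdom hpre
  obtain ⟨hne, -⟩ := hpre
  unfold Spec_find_best_example
  simp only [find_best_example, find_best_example_alt]
  cases examples with
  | nil => exact absurd rfl hne
  | cons x l =>
    have key := pvAB (fun ex => pvOverlap (PySem.Set.ofList (PySem.Str.split₀ (PySem.Str.lower user_question))) ex) x l []
    simp only [gt_iff_lt] at key ⊢
    cases hres : (List.foldl (fun (st : Option (List (String × String)) × Nat) ex => if st.2 < pvOverlap (PySem.Set.ofList (PySem.Str.split₀ (PySem.Str.lower user_question))) ex then (some ex, pvOverlap (PySem.Set.ofList (PySem.Str.split₀ (PySem.Str.lower user_question))) ex) else st) (none, 0) (x :: l)).1 with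
    | none => rw [hres] at key; simpa using key
    | some b => rw [hres] at key; simpa using key
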